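-- pv_equiv track=rewrite | github.com/knowit-enhanced-coding-comp/hackathon-tt-py | tt/tt/translator.py | _translate_template_literals
-- ===== SOURCE A (Python) =====
-- def _translate_template_literals(line: str) -> str:
--     """Convert TypeScript template literals to Python f-strings."""
--     if '`' not in line:
--         return line
--     result = []
--     i = 0
--     while i < len(line):
--         if line[i] == '`':
--             j = i + 1
--             content = []
--             while j < len(line) and line[j] != '`':
--                 if line[j] == '$' and j + 1 < len(line) and line[j + 1] == '{':
--                     k = j + 2
--                     depth = 1
--                     expr_chars = []
--                     while k < len(line) and depth > 0:
--                         if line[k] == '{':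
--                             depth += 1
--                         elif line[k] == '}':
--                             depth -= 1
--                         if depth > 0:
--                             expr_chars.append(line[k])
--                         k += 1
--                     content.append('{' + ''.join(expr_chars) + '}')
--                     j = k
--                 else:
--                     c = line[j]
--                     if c == '"':
--                         c = '\\"'
--                     content.append(c)
--                     j += 1
--             result.append('f"' + ''.join(content) + '"')
--             i = j + 1
--         else:
--             result.append(line[i])
--             i += 1
--     return ''.join(result)
-- ===== SOURCE B (Python) =====
-- def _translate_template_literals(line: str) -> str:
--     """Convert TypeScript template literals to Python f-strings.
--     Flat one-pass state machine (outside / template / expression) instead of nested scans."""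
--     OUT, TMPL, EXPR = 0, 1, 2
--     state = OUT
--     pending_dollar = False
--     result = []
--     content = []
--     expr = []
--     depth = 0
--     for c in line:
--         if state == OUT:
--             if c == '`':
--                 state = TMPL
--                 content = []
--                 pending_dollar = False
--             else:
--                 result.append(c)
--         elif state == TMPL:
--             if pending_dollar:
--                 pending_dollar = False
--                 if c == '{':
--                     state = EXPR
--                     expr = []
--                     depth = 1
--                     continue
--                 content.append('$')
--             if c == '`':
--                 result.append('f"' + ''.join(content) + '"')
--                 state = OUT
--             elif c == '$':
--                 pending_dollar = True
--             else:
--                 content.append('\\"' if c == '"' else c)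
--         else:  # EXPR
--             if c == '{':
--                 depth += 1
--             elif c == '}':
--                 depth -= 1
--             if depth == 0:
--                 content.append('{' + ''.join(expr) + '}')
--                 state = TMPL
--             else:
--                 expr.append(c)
--     if state == TMPL:
--         if pending_dollar:
--             content.append('$')
--         result.append('f"' + ''.join(content) + '"')
--     elif state == EXPR:
--         result.append('f"' + ''.join(content) + '{' + ''.join(expr) + '}"')
--     return ''.join(result)
-- ===== Notes on version B (the rewrite author's own statement) =====
-- stated objective: alternative
-- what changed: A's nested while-loops (outer line scan, inner template scan, inner-inner brace-depth expression scan with index juggling) are replaced by a single flat pass over the characters driven by an explicit state machine (outside / in-template with a pending-'$' flag / in-expression with a depth counter).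
import Mathlib
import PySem

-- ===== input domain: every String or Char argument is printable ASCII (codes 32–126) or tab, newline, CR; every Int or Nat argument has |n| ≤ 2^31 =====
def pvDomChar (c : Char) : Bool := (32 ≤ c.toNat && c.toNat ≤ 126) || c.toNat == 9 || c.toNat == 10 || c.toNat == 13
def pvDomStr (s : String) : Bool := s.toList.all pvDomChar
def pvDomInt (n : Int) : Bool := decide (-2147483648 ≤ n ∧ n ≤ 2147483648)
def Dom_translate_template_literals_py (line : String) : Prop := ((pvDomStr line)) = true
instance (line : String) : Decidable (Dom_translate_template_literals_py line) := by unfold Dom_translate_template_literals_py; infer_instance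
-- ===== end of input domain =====

-- B replaces A's nested while-loops by a flat one-pass state machine (outside / template /
-- expression states with a depth counter); alternative decomposition, same output.


-- ===== PORT A =====
-- A's inner-inner while: scan the ${…} expression, tracking brace depth
def exprA : List Char → Nat → (List Char × List Char)
  | [], _ => ([], [])
  | c :: cs, d =>
      if d = 0 then ([], c :: cs)
      else
        let d' := if c = '{' then d + 1 else if c = '}' then d - 1 else d
        let p := exprA cs d'
        (if 0 < d' then c :: p.1 else p.1, p.2)

-- length bound, needed for the termination of contentA (cited by name in decreasing_by)
theorem exprA_len : ∀ (cs : List Char) (d : Nat), (exprA cs d).2.length ≤ cs.length := by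
  intro cs
  induction cs with
  | nil => intro d; simp [exprA]
  | cons c cs ih =>
      intro d
      by_cases h : d = 0
      · simp [exprA, h]
      · simp only [exprA, if_neg h]
        exact Nat.le_succ_of_le (ih _)

-- A's inner while: collect template content up to the closing backtick
def contentA : List Char → (List Char × List Char)
  | [] => ([], [])
  | c :: cs =>
      if c = '`' then ([], cs)
      else if c = '$' ∧ cs.head? = some '{' then
        let p := exprA cs.tail 1
        let q := contentA p.2
        ('{' :: p.1 ++ '}' :: q.1, q.2)
      else
        let q := contentA cs
        ((if c = '"' then ['\\', '"'] else [c]) ++ q.1, q.2)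
termination_by cs => cs.length
decreasing_by
  · exact Nat.lt_succ_of_le (le_trans (exprA_len _ _) (by cases cs <;> simp))
  · simp

-- length bound, needed for the termination of outerA (cited by name in decreasing_by)
theorem contentA_len : ∀ (n : Nat) (cs : List Char), cs.length ≤ n → (contentA cs).2.length ≤ cs.length := by
  intro n
  induction n with
  | zero =>
      intro cs h
      match cs with
      | [] => simp [contentA]
      | _ :: _ => simp at h
  | succ n ih =>
      intro cs h
      match cs with
      | [] => simp [contentA]
      | c :: cs =>
          by_cases hb : c = '`'
          · simp [contentA, hb]
          · by_cases hd : c = '$' ∧ cs.head? = some '{'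
            · simp only [contentA, if_neg hb, if_pos hd]
              have h1 : (exprA cs.tail 1).2.length ≤ cs.length :=
                le_trans (exprA_len _ _) (by cases cs <;> simp)
              have h2 := ih (exprA cs.tail 1).2
                (le_trans h1 (by simp at h; omega))
              simp only [List.length_cons]
              omega
            · simp only [contentA, if_neg hb, if_neg hd]
              have h2 := ih cs (by simp at h; omega)
              simp only [List.length_cons]
              omega

-- A's outer while over the whole line
def outerA : List Char → List Char
  | [] => []
  | c :: cs =>
      if c = '`' then
        let p := contentA cs
        'f' :: '"' :: p.1 ++ '"' :: outerA p.2
      else c :: outerA cs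
termination_by cs => cs.length
decreasing_by
  · exact Nat.lt_succ_of_le (contentA_len cs.length cs (le_refl _))
  · simp

def translate_template_literals_py (line : String) : String :=
  if '`' ∈ line.toList then String.ofList (outerA line.toList) else line

-- ===== PORT B =====
-- the scanner state: outside any backtick / inside a template / inside a ${…} expression
inductive BSt where
  | out : BSt
  | tmpl : List Char → Bool → BSt            -- content so far, pending '$' flag
  | expr : List Char → List Char → Nat → BSt -- content, expression so far, brace depth
deriving DecidableEq, Repr

-- weight of a pending-'$' state, for runB's termination measure
def bstW : BSt → Nat
  | .tmpl _ true => 1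
  | _ => 0

-- end-of-line flush (the code after Source B's for-loop)
def finalB : BSt → List Char
  | .out => []
  | .tmpl ct pd => 'f' :: '"' :: (if pd then ct ++ ['$'] else ct) ++ ['"']
  | .expr ct e _ => 'f' :: '"' :: ct ++ '{' :: e ++ '}' :: '"' :: []

-- Source B's single for-loop as recursion over the characters carrying the state;
-- the (.tmpl _ true) non-'{' case re-processes c with the flag cleared,
-- mirroring Source B's fall-through after content.append('$')
def runB : List Char → BSt → List Char
  | [], st => finalB st
  | c :: cs, .out => if c = '`' then runB cs (.tmpl [] false) else c :: runB cs .out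
  | c :: cs, .tmpl ct true =>
      if c = '{' then runB cs (.expr ct [] 1)
      else runB (c :: cs) (.tmpl (ct ++ ['$']) false)
  | c :: cs, .tmpl ct false =>
      if c = '`' then 'f' :: '"' :: ct ++ '"' :: runB cs .out
      else if c = '$' then runB cs (.tmpl ct true)
      else runB cs (.tmpl (ct ++ (if c = '"' then ['\\', '"'] else [c])) false)
  | c :: cs, .expr ct e d =>
      let d' := if c = '{' then d + 1 else if c = '}' then d - 1 else d
      if d' = 0 then runB cs (.tmpl (ct ++ '{' :: e ++ ['}']) false)
      else runB cs (.expr ct (e ++ [c]) d')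
termination_by cs st => cs.length * 2 + bstW st
decreasing_by all_goals simp [bstW] <;> omega

def translate_template_literals_py_alt (line : String) : String :=
  String.ofList (runB line.toList .out)

-- ===== PRECONDITION & SPEC =====
def Spec_translate_template_literals_py (line : String) (out : String) : Prop := out = translate_template_literals_py_alt line
instance (line : String) (out : String) : Decidable (Spec_translate_template_literals_py line out) := by unfold Spec_translate_template_literals_py; infer_instance

-- ===== CLAIM (what is proved, stated in full; the proofs are below) =====
def Claim_equal_translate_template_literals_py : Prop := ∀ (line : String), Dom_translate_template_literals_py line → Spec_translate_template_literals_py line (translate_template_literals_py line)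

-- ===== LEMMAS AND PROOFS =====

theorem exprA_zero (cs : List Char) : exprA cs 0 = ([], cs) := by
  cases cs <;> simp [exprA]

-- B in expression state computes A's expression scan, then continues in template state
theorem run_expr : ∀ (cs : List Char) (d : Nat), 0 < d → ∀ (ct e : List Char),
    runB cs (.expr ct e d) =
      runB (exprA cs d).2 (.tmpl (ct ++ '{' :: e ++ (exprA cs d).1 ++ ['}']) false) := by
  intro cs
  induction cs with
  | nil => intro d hd ct e; simp [runB, exprA, finalB]
  | cons c cs ih =>
      intro d hd ct e
      have hdne : ¬ d = 0 := by omega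
      simp only [runB, exprA, if_neg hdne]
      set d' := if c = '{' then d + 1 else if c = '}' then d - 1 else d with hd'
      by_cases h0 : d' = 0
      · simp [h0, exprA_zero]
      · have hpos : 0 < d' := Nat.pos_of_ne_zero h0
        simp only [if_neg h0, if_pos hpos, ih d' hpos ct (e ++ [c])]
        simp

-- B in template state computes A's content scan, then continues outside
theorem run_template : ∀ (n : Nat) (cs : List Char), cs.length ≤ n → ∀ (ct : List Char),
    runB cs (.tmpl ct false) =
      'f' :: '"' :: (ct ++ (contentA cs).1) ++ '"' :: runB (contentA cs).2 .out := by
  intro n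
  induction n with
  | zero =>
      intro cs h
      match cs with
      | [] => intro ct; simp [runB, contentA, finalB]
      | _ :: _ => simp at h
  | succ n ih =>
      intro cs h
      match cs with
      | [] => intro ct; simp [runB, contentA, finalB]
      | c :: cs =>
          intro ct
          simp only [List.length_cons] at h
          by_cases hb : c = '`'
          · simp [runB, contentA, hb]
          · by_cases hd : c = '$'
            · subst hd
              match cs with
              | [] => simp [runB, contentA, finalB]
              | c2 :: cs2 =>
                  by_cases hbr : c2 = '{'
                  · subst hbr
                    have hlen : (exprA cs2 1).2.length ≤ n :=
                      le_trans (exprA_len _ _) (by simp at h; omega)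
                    have hc : contentA ('$' :: '{' :: cs2) =
                        ('{' :: (exprA cs2 1).1 ++ '}' :: (contentA (exprA cs2 1).2).1,
                          (contentA (exprA cs2 1).2).2) := by
                      rw [contentA]; simp
                    have hstep : runB ('$' :: '{' :: cs2) (BSt.tmpl ct false) =
                        runB cs2 (BSt.expr ct [] 1) := by
                      simp [runB]
                    rw [hstep, run_expr cs2 1 Nat.one_pos ct [], ih _ hlen, hc]
                    simp
                  · have hlen : (c2 :: cs2).length ≤ n := by simp at h ⊢; omega
                    have hc : contentA ('$' :: c2 :: cs2) =
                        ('$' :: (contentA (c2 :: cs2)).1, (contentA (c2 :: cs2)).2) := by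
                      rw [contentA]; simp [hbr]
                    have hstep : runB ('$' :: c2 :: cs2) (BSt.tmpl ct false) =
                        runB (c2 :: cs2) (BSt.tmpl (ct ++ ['$']) false) := by
                      simp [runB, hbr]
                    rw [hstep, ih _ hlen, hc]
                    simp
            · have hlen : cs.length ≤ n := by omega
              have hc : contentA (c :: cs) =
                  ((if c = '"' then ['\\', '"'] else [c]) ++ (contentA cs).1, (contentA cs).2) := by
                rw [contentA]; simp [hb, hd]
              have hstep : runB (c :: cs) (BSt.tmpl ct false) =
                  runB cs (BSt.tmpl (ct ++ (if c = '"' then ['\\', '"'] else [c])) false) := by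
                simp [runB, hb, hd]
              rw [hstep, ih _ hlen, hc]
              simp

-- B from the outside state computes A's outer loop
theorem run_outer : ∀ (n : Nat) (cs : List Char), cs.length ≤ n → runB cs .out = outerA cs := by
  intro n
  induction n with
  | zero =>
      intro cs h
      match cs with
      | [] => simp [runB, outerA, finalB]
      | _ :: _ => simp at h
  | succ n ih =>
      intro cs h
      match cs with
      | [] => simp [runB, outerA, finalB]
      | c :: cs =>
          simp only [List.length_cons] at h
          by_cases hb : c = '`'
          · have h1 : cs.length ≤ n := by omega
            have h2 : (contentA cs).2.length ≤ n :=
              le_trans (contentA_len cs.length cs (le_refl _)) h1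
            simp [runB, outerA, hb, run_template n cs h1, ih _ h2]
          · simp [runB, outerA, hb, ih cs (by omega)]

-- a line without backticks passes through B unchanged
theorem runB_no_backtick : ∀ (cs : List Char), '`' ∉ cs → runB cs .out = cs := by
  intro cs
  induction cs with
  | nil => intro _; simp [runB, finalB]
  | cons c cs ih =>
      intro h
      simp only [List.mem_cons, not_or] at h
      simp [runB, Ne.symm h.1, ih h.2]

-- ===== VERDICT (by name: the statement is the Claim_ definition above) =====
theorem translate_template_literals_py_spec : Claim_equal_translate_template_literals_py := by
  intro line _
  unfold Spec_translate_template_literals_py translate_template_literals_py translate_template_literals_py_alt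
  by_cases h : '`' ∈ line.toList
  · simp [h, run_outer line.toList.length line.toList (le_refl _)]
  · simp [h, runB_no_backtick line.toList h]
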